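-- pv_equiv track=rewrite | github.com/MeowKJ/maimai-lab | apps/bot/src/features/b50/draw.py | get_char_width
-- ===== SOURCE A (Python) =====
-- def get_char_width(codepoint: int) -> int:
--     widths = [
--         (126, 1),
--         (159, 0),
--         (687, 1),
--         (710, 0),
--         (711, 1),
--         (727, 0),
--         (733, 1),
--         (879, 0),
--         (1154, 1),
--         (1161, 0),
--         (4347, 1),
--         (4447, 2),
--         (7467, 1),
--         (7521, 0),
--         (8369, 1),
--         (8426, 0),
--         (9000, 1),
--         (9002, 2),
--         (11021, 1),
--         (12350, 2),
--         (12351, 1),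
--         (12438, 2),
--         (12442, 0),
--         (19893, 2),
--         (19967, 1),
--         (55203, 2),
--         (63743, 1),
--         (64106, 2),
--         (65039, 1),
--         (65059, 0),
--         (65131, 2),
--         (65279, 1),
--         (65376, 2),
--         (65500, 1),
--         (65510, 2),
--         (120831, 1),
--         (262141, 2),
--         (1114109, 1),
--     ]
--     if codepoint in {0xE, 0xF}:
--         return 0
--     for num, wid in widths:
--         if codepoint <= num:
--             return wid
--     return 1
-- ===== SOURCE B (Python) =====
-- from bisect import bisect_left
--
-- _THRESHOLDS = [126, 159, 687, 710, 711, 727, 733, 879, 1154, 1161,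
--                4347, 4447, 7467, 7521, 8369, 8426, 9000, 9002, 11021,
--                12350, 12351, 12438, 12442, 19893, 19967, 55203, 63743,
--                64106, 65039, 65059, 65131, 65279, 65376, 65500, 65510,
--                120831, 262141, 1114109]
-- _WIDTHS = [1, 0, 1, 0, 1, 0, 1, 0, 1, 0,
--            1, 2, 1, 0, 1, 0, 1, 2, 1,
--            2, 1, 2, 0, 2, 1, 2, 1,
--            2, 1, 0, 2, 1, 2, 1, 2,
--            1, 2, 1]
--
-- def get_char_width(codepoint: int) -> int:
--     if codepoint in {0xE, 0xF}:
--         return 0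
--     i = bisect_left(_THRESHOLDS, codepoint)
--     if i == len(_THRESHOLDS):
--         return 1
--     return _WIDTHS[i]
-- ===== Notes on version B (the rewrite author's own statement) =====
-- stated objective: faster
-- what changed: Replaces the linear scan over the (threshold, width) pair list with a binary search (bisect_left) over two precomputed parallel constant lists of sorted thresholds and widths.
import Mathlib
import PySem

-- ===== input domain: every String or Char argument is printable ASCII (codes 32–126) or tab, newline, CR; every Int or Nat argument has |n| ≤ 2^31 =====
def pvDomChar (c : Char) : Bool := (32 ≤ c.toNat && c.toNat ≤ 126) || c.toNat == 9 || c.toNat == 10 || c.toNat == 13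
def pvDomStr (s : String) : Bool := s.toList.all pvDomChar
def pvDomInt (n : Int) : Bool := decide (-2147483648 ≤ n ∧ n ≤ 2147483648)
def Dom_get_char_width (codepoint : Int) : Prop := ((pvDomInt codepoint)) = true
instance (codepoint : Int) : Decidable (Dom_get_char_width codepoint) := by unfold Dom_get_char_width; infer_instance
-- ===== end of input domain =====

-- B replaces A's linear scan of the (threshold, width) table with a binary search over two parallel constant lists (return value only; no side effects involved).

-- ===== PORT A =====
-- the 'for num, wid in widths: if codepoint <= num: return wid' loop, as structural recursion
def pvScanWidths (ws : List (Int × Int)) (codepoint : Int) : Int :=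
  match ws with
  | [] => 1
  | (num, wid) :: rest => if codepoint ≤ num then wid else pvScanWidths rest codepoint

def get_char_width (codepoint : Int) : Int :=
  let widths : List (Int × Int) :=
    [(126, 1), (159, 0), (687, 1), (710, 0), (711, 1), (727, 0), (733, 1),
     (879, 0), (1154, 1), (1161, 0), (4347, 1), (4447, 2), (7467, 1),
     (7521, 0), (8369, 1), (8426, 0), (9000, 1), (9002, 2), (11021, 1),
     (12350, 2), (12351, 1), (12438, 2), (12442, 0), (19893, 2), (19967, 1),
     (55203, 2), (63743, 1), (64106, 2), (65039, 1), (65059, 0), (65131, 2),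
     (65279, 1), (65376, 2), (65500, 1), (65510, 2), (120831, 1), (262141, 2),
     (1114109, 1)]
  if codepoint = 0xE ∨ codepoint = 0xF then 0
  else pvScanWidths widths codepoint

-- ===== PORT B =====
def pvThresholds : List Int :=
  [126, 159, 687, 710, 711, 727, 733, 879, 1154, 1161, 4347, 4447, 7467,
   7521, 8369, 8426, 9000, 9002, 11021, 12350, 12351, 12438, 12442, 19893,
   19967, 55203, 63743, 64106, 65039, 65059, 65131, 65279, 65376, 65500,
   65510, 120831, 262141, 1114109]

def pvWidths : List Int :=
  [1, 0, 1, 0, 1, 0, 1, 0, 1, 0, 1, 2, 1, 0, 1, 0, 1, 2, 1, 2, 1, 2, 0, 2,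
   1, 2, 1, 2, 1, 0, 2, 1, 2, 1, 2, 1, 2, 1]

-- bisect.bisect_left's while-loop (a[mid] always in range, so getD is exact here)
def pvBisectLeft (a : List Int) (x : Int) (lo hi : Nat) : Nat :=
  if lo < hi then
    let mid := (lo + hi) / 2
    if a.getD mid 0 < x then pvBisectLeft a x (mid + 1) hi
    else pvBisectLeft a x lo mid
  else lo
termination_by hi - lo
decreasing_by all_goals omega

def get_char_width_alt (codepoint : Int) : Int :=
  if codepoint = 0xE ∨ codepoint = 0xF then 0
  else
    let i := pvBisectLeft pvThresholds codepoint 0 pvThresholds.length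
    if i = pvThresholds.length then 1
    else pvWidths.getD i 1

-- ===== PRECONDITION & SPEC =====
def Spec_get_char_width (codepoint : Int) (out : Int) : Prop := out = get_char_width_alt codepoint
instance (codepoint : Int) (out : Int) : Decidable (Spec_get_char_width codepoint out) := by unfold Spec_get_char_width; infer_instance

-- ===== CLAIM (what is proved, stated in full; the proofs are below) =====
def Claim_equal_get_char_width : Prop := ∀ (codepoint : Int), Dom_get_char_width codepoint → Spec_get_char_width codepoint (get_char_width codepoint)

-- ===== LEMMAS AND PROOFS =====

-- thresholds are nondecreasing (getD form)
theorem pvThresholds_mono : ∀ i j : Nat, i ≤ j → j < pvThresholds.length →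
    pvThresholds.getD i 0 ≤ pvThresholds.getD j 0 := by
  intro i j hij hj
  rcases Nat.lt_or_ge i j with hlt | hge
  · have hp : pvThresholds.Pairwise (· ≤ ·) := by decide
    have hi : i < pvThresholds.length := lt_trans hlt hj
    rw [List.getD_eq_getElem _ _ hi, List.getD_eq_getElem _ _ hj]
    exact List.pairwise_iff_getElem.mp hp i j hi hj hlt
  · have : i = j := le_antisymm hij hge
    simp [this]

-- invariant of bisect_left's loop: the result is ≤ len, everything strictly
-- before it is < x, and (if in range) the element at it is ≥ x
theorem pvBisectLeft_inv (t : List Int) (x : Int)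
    (mono : ∀ i j : Nat, i ≤ j → j < t.length → t.getD i 0 ≤ t.getD j 0)
    (lo hi : Nat) (hlh : lo ≤ hi) (hhl : hi ≤ t.length)
    (hlt : ∀ j, j < lo → t.getD j 0 < x)
    (hge : ∀ j, hi ≤ j → j < t.length → x ≤ t.getD j 0) :
    pvBisectLeft t x lo hi ≤ t.length ∧
    (∀ j, j < pvBisectLeft t x lo hi → t.getD j 0 < x) ∧
    (pvBisectLeft t x lo hi < t.length → x ≤ t.getD (pvBisectLeft t x lo hi) 0) := by
  rw [pvBisectLeft]
  by_cases h : lo < hi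
  · rw [if_pos h]
    by_cases hm : t.getD ((lo + hi) / 2) 0 < x
    · rw [if_pos hm]
      exact pvBisectLeft_inv t x mono ((lo + hi) / 2 + 1) hi (by omega) hhl
        (fun j hj => by
          rcases Nat.lt_or_ge j lo with hjlo | hjlo
          · exact hlt j hjlo
          · exact lt_of_le_of_lt (mono j ((lo + hi) / 2) (by omega) (by omega)) hm)
        hge
    · rw [if_neg hm]
      exact pvBisectLeft_inv t x mono lo ((lo + hi) / 2) (by omega) (by omega) hlt
        (fun j hj hjl => le_trans (le_of_not_gt hm) (mono ((lo + hi) / 2) j hj hjl))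
  · rw [if_neg h]
    have : lo = hi := le_antisymm hlh (le_of_not_gt h)
    exact ⟨le_trans hlh hhl, hlt, fun hl => hge lo (le_of_eq this.symm) hl⟩
termination_by hi - lo
decreasing_by all_goals omega

-- the linear scan returns w[i] (or 1 past the end) for ANY index i with the
-- bisect_left characterisation
theorem pvScanWidths_of_inv : ∀ (t w : List Int) (x : Int) (i : Nat),
    t.length = w.length → i ≤ t.length →
    (∀ j, j < i → t.getD j 0 < x) → (i < t.length → x ≤ t.getD i 0) →
    pvScanWidths (t.zip w) x = if i = t.length then 1 else w.getD i 1
  | [], w, x, i, hlen, hle, _, _ => by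
    simp at hle
    simp [hle, pvScanWidths]
  | a :: t', [], x, i, hlen, hle, hlt, hge => by simp at hlen
  | a :: t', b :: w', x, i, hlen, hle, hlt, hge => by
    simp only [List.zip_cons_cons, pvScanWidths]
    by_cases h : x ≤ a
    · rw [if_pos h]
      have hi0 : i = 0 := by
        by_contra hne
        have := hlt 0 (Nat.pos_of_ne_zero hne)
        simp [List.getD] at this
        omega
      simp [hi0]
    · rw [if_neg h]
      have hne : i ≠ 0 := by
        intro h0
        have := hge (by simp [h0])
        rw [h0] at this
        simp [List.getD] at this
        omega
      obtain ⟨i', rfl⟩ := Nat.exists_eq_succ_of_ne_zero hne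
      have := pvScanWidths_of_inv t' w' x i' (by simpa using hlen)
        (by simpa using hle)
        (fun j hj => by simpa using hlt (j + 1) (by omega))
        (fun hl => by simpa using hge (by simpa using hl))
      rw [this]
      by_cases hi : i' = t'.length
      · simp [hi]
      · have hne2 : ¬(i' + 1 = (a :: t').length) := by
          simp only [List.length_cons]
          omega
        rw [if_neg hi, if_neg hne2, List.getD_cons_succ]

-- ===== VERDICT (by name: the statement is the Claim_ definition above) =====
theorem get_char_width_spec : Claim_equal_get_char_width := by
  intro c _
  unfold Spec_get_char_width get_char_width get_char_width_alt
  by_cases h : c = 0xE ∨ c = 0xF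
  · rw [if_pos h, if_pos h]
  · rw [if_neg h, if_neg h]
    obtain ⟨h1, h2, h3⟩ := pvBisectLeft_inv pvThresholds c pvThresholds_mono
      0 pvThresholds.length (Nat.zero_le _) (le_refl _)
      (fun j hj => absurd hj (Nat.not_lt_zero j))
      (fun j hj hjl => absurd hjl (Nat.not_lt.mpr hj))
    have hzip : ([(126, 1), (159, 0), (687, 1), (710, 0), (711, 1), (727, 0), (733, 1),
        (879, 0), (1154, 1), (1161, 0), (4347, 1), (4447, 2), (7467, 1),
        (7521, 0), (8369, 1), (8426, 0), (9000, 1), (9002, 2), (11021, 1),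
        (12350, 2), (12351, 1), (12438, 2), (12442, 0), (19893, 2), (19967, 1),
        (55203, 2), (63743, 1), (64106, 2), (65039, 1), (65059, 0), (65131, 2),
        (65279, 1), (65376, 2), (65500, 1), (65510, 2), (120831, 1), (262141, 2),
        (1114109, 1)] : List (Int × Int)) = pvThresholds.zip pvWidths := by rfl
    rw [hzip]
    exact pvScanWidths_of_inv pvThresholds pvWidths c _ (by rfl) h1 h2 h3
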